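-- pv_equiv track=rewrite | github.com/human02/Interview-Preparation | dsa/hash_table/lottery_count_largest_grp.py | findGroup_recur
-- ===== SOURCE A (Python) =====
-- def findGroup_recur(lowVal, highVal):
--
--     def helper(num):
--         if num == 0:
--             return 0
--         return (num % 10) + helper(num // 10)
--
--     mpp = {}
--     for i in range(lowVal, highVal + 1):
--         mpp[helper(i)] = mpp.get(helper(i), 0) + 1
--
--     maxCount = max(mpp.values())
--     res = sum(1 for val in mpp.values() if val == maxCount)
--
--     return [maxCount, res]
-- ===== SOURCE B (Python) =====
-- def findGroup_recur(lowVal, highVal):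
--
--     def digit_sum(n):
--         t = 0
--         while n > 0:
--             t += n % 10
--             n //= 10
--         return t
--
--     def upto(n):
--         # counts[s] = how many i in [0, n] have digit sum s, for s in 0..90
--         if n < 0:
--             return [0] * 91
--         if n < 10:
--             return [1 if s <= n else 0 for s in range(91)]
--         q, r = n // 10, n % 10
--         sub = upto(q - 1)
--         dq = digit_sum(q)
--         return [sum(sub[s - d] for d in range(10) if s - d >= 0)
--                 + sum(1 for d in range(r + 1) if dq + d == s)
--                 for s in range(91)]
--
--     hi = upto(highVal)
--     lo = upto(lowVal - 1)
--     groups = [h - l for h, l in zip(hi, lo) if h > l]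
--     maxCount = max(groups)
--     return [maxCount, groups.count(maxCount)]
-- ===== Notes on version B (the rewrite author's own statement) =====
-- stated objective: faster
-- what changed: Instead of walking every number in [lowVal, highVal] and tallying digit sums in a dict, B runs a digit-DP: one recursion over the decimal length computes, for each possible digit sum 0..90, how many numbers in [0,n] have it; group sizes are the differences upto(high)-upto(low-1) and max size plus multiplicity are read off the 91 counts.
import Mathlib
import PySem

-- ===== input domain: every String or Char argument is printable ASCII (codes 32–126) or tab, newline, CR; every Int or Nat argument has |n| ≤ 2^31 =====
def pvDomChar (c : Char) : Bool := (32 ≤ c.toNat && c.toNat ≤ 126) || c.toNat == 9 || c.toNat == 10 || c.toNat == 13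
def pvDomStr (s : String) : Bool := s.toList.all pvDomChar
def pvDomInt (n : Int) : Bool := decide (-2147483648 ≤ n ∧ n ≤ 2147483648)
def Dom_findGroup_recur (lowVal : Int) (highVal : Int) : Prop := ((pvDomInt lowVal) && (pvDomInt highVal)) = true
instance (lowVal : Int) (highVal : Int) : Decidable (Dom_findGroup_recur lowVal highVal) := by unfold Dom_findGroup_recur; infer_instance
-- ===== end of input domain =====

-- B replaces A's per-number digit-sum scan of the whole range by a digit-DP that counts, in one
-- recursion over the decimal length, how many numbers in [0,n] have each possible digit sum
-- (objective: faster, asymptotically).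

-- ===== PORT A =====
-- A's inner helper; Python recurses forever on num < 0 (unreachable: Pre_ keeps the range nonnegative), we return 0 there.
def pvHelper (num : Int) : Int :=
  if 0 < num then (PySem.Int.mod num 10) + pvHelper (PySem.Int.floordiv num 10) else 0
termination_by num.toNat
decreasing_by
  rw [PySem.Int.floordiv_eq_ediv_of_pos (by norm_num)]
  omega

def findGroup_recur (lowVal : Int) (highVal : Int) : List Int :=
  let mpp := (PySem.List.pyRange lowVal (highVal + 1) 1).foldl
      (fun d i => d.insert (pvHelper i) (d.getD (pvHelper i) 0 + 1)) PySem.Dict.empty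
  match PySem.List.max? mpp.values (fun v => v) with
  | some maxCount => [maxCount, ((mpp.values).map (fun v => if v = maxCount then (1:Int) else 0)).sum]
  | none => []  -- max() of an empty dict: Python raises ValueError (lowVal > highVal); excluded by Pre_

-- ===== PORT B =====
-- Source B's digit_sum: 'while n > 0' loop with accumulator t
def pvDsAux (t n : Int) : Int :=
  if 0 < n then pvDsAux (t + PySem.Int.mod n 10) (PySem.Int.floordiv n 10) else t
termination_by n.toNat
decreasing_by
  rw [PySem.Int.floordiv_eq_ediv_of_pos (by norm_num)]
  omega

def pvDigitSum (n : Int) : Int := pvDsAux 0 n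

-- Source B's upto(n): counts[s] = #{0 ≤ i ≤ n : digit_sum i = s} for s in 0..90
def pvUpto (n : Int) : List Int :=
  if n < 0 then List.replicate 91 0
  else if n < 10 then (PySem.List.pyRange 0 91 1).map (fun s => if s ≤ n then (1:Int) else 0)
  else
    let q := PySem.Int.floordiv n 10
    let r := PySem.Int.mod n 10
    let sub := pvUpto (q - 1)
    let dq := pvDigitSum q
    (PySem.List.pyRange 0 91 1).map (fun s =>
      ((PySem.List.pyRange 0 10 1).map (fun d => if 0 ≤ s - d then PySem.List.pyGetD sub (s - d) 0 else 0)).sum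
      + ((PySem.List.pyRange 0 (r + 1) 1).map (fun d => if dq + d = s then (1:Int) else 0)).sum)
termination_by n.toNat
decreasing_by
  rw [PySem.Int.floordiv_eq_ediv_of_pos (by norm_num)]
  omega

def findGroup_recur_alt (lowVal : Int) (highVal : Int) : List Int :=
  let hi := pvUpto highVal
  let lo := pvUpto (lowVal - 1)
  let groups := ((hi.zip lo).filter (fun p => p.2 < p.1)).map (fun p => p.1 - p.2)
  match PySem.List.max? groups (fun v => v) with
  | some maxCount => [maxCount, (PySem.List.count groups maxCount : Int)]
  | none => []  -- unreachable under Pre_ (groups nonempty there); Python's max would raise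

-- ===== PRECONDITION & SPEC =====
-- Pre_ excludes exactly the inputs where A raises: lowVal > highVal (max() of an empty dict,
-- ValueError) and lowVal < 0 (helper recurses forever on negative numbers, RecursionError).
def Pre_findGroup_recur (lowVal : Int) (highVal : Int) : Prop := 0 ≤ lowVal ∧ lowVal ≤ highVal
instance (lowVal : Int) (highVal : Int) : Decidable (Pre_findGroup_recur lowVal highVal) := by
  unfold Pre_findGroup_recur; infer_instance

def pvWitness_findGroup_recur : Int × Int := (3, 17)

def Spec_findGroup_recur (lowVal : Int) (highVal : Int) (out : List Int) : Prop := out = findGroup_recur_alt lowVal highVal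
instance (lowVal : Int) (highVal : Int) (out : List Int) : Decidable (Spec_findGroup_recur lowVal highVal out) := by unfold Spec_findGroup_recur; infer_instance

-- ===== CLAIM (what is proved, stated in full; the proofs are below) =====
def Claim_equal_findGroup_recur : Prop := ∀ (lowVal : Int) (highVal : Int), Dom_findGroup_recur lowVal highVal → Pre_findGroup_recur lowVal highVal → Spec_findGroup_recur lowVal highVal (findGroup_recur lowVal highVal)

-- ===== LEMMAS AND PROOFS =====

-- the number of i in [a, b) whose digit sum is s
def pvCnt (a b s : Int) : Int :=
  (((PySem.List.pyRange a b 1).countP (fun i => pvHelper i == s)) : Int)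

theorem pvHelper_nonneg (n : Int) : 0 ≤ pvHelper n := by
  induction n using pvHelper.induct with
  | case1 n h ih =>
    rw [pvHelper, if_pos h, PySem.Int.mod_eq_emod_of_pos (by norm_num)]
    omega
  | case2 n h =>
    rw [pvHelper, if_neg h]

theorem pvHelper_zero : pvHelper 0 = 0 := by
  rw [pvHelper]; norm_num

theorem pvHelper_small (d : Int) (h0 : 0 ≤ d) (h9 : d < 10) : pvHelper d = d := by
  by_cases h : 0 < d
  · rw [pvHelper, if_pos h, PySem.Int.mod_eq_emod_of_pos (by norm_num),
      PySem.Int.floordiv_eq_ediv_of_pos (by norm_num)]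
    have hd : d / 10 = 0 := by omega
    rw [hd, pvHelper_zero]
    omega
  · have : d = 0 := by omega
    rw [this, pvHelper_zero]

theorem pvHelper_tenmul (q d : Int) (hq : 0 ≤ q) (h0 : 0 ≤ d) (h9 : d < 10) :
    pvHelper (10 * q + d) = pvHelper q + d := by
  by_cases hq0 : q = 0
  · rw [hq0, pvHelper_zero]
    simpa using pvHelper_small d h0 h9
  · have hpos : 0 < 10 * q + d := by omega
    rw [pvHelper, if_pos hpos, PySem.Int.mod_eq_emod_of_pos (by norm_num),
      PySem.Int.floordiv_eq_ediv_of_pos (by norm_num)]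
    have h1 : (10 * q + d) % 10 = d := by omega
    have h2 : (10 * q + d) / 10 = q := by omega
    rw [h1, h2]
    ring

theorem pvHelper_pow (k : Nat) : ∀ n : Int, 0 ≤ n → n < 10 ^ k → pvHelper n ≤ 9 * k := by
  induction k with
  | zero =>
    intro n h0 h1
    norm_num at h1
    have hn : n = 0 := by omega
    rw [hn, pvHelper_zero]
    simp
  | succ k ih =>
    intro n h0 h1
    by_cases h : 0 < n
    · rw [pvHelper, if_pos h, PySem.Int.mod_eq_emod_of_pos (by norm_num),
        PySem.Int.floordiv_eq_ediv_of_pos (by norm_num)]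
      have hpow : (10:Int) ^ (k+1) = 10 * 10 ^ k := by ring
      rw [hpow] at h1
      have hlt : n / 10 < 10 ^ k := by omega
      have := ih (n / 10) (by omega) hlt
      have hmod : n % 10 ≤ 9 := by omega
      push_cast
      push_cast at this
      omega
    · have hn : n = 0 := by omega
      rw [hn, pvHelper_zero]
      positivity

theorem pvHelper_le90 (n : Int) (h0 : 0 ≤ n) (h : n ≤ 2147483648) : pvHelper n ≤ 90 := by
  have h10 : (10:Int) ^ 10 = 10000000000 := by norm_num
  have := pvHelper_pow 10 n h0 (by rw [h10]; omega)
  omega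

theorem pvDsAux_eq (t n : Int) : pvDsAux t n = t + pvHelper n := by
  induction t, n using pvDsAux.induct with
  | case1 t n h ih =>
    rw [pvDsAux, if_pos h, pvHelper, if_pos h, ih]
    ring
  | case2 t n h =>
    rw [pvDsAux, if_neg h, pvHelper, if_neg h]
    ring

theorem pvDigitSum_eq (n : Int) : pvDigitSum n = pvHelper n := by
  simpa [pvDigitSum] using pvDsAux_eq 0 n

theorem pvCnt_nil (a b s : Int) (h : b ≤ a) : pvCnt a b s = 0 := by
  simp [pvCnt, PySem.List.pyRange_one_eq_nil h]

theorem pvCnt_succ (a b s : Int) (h : a ≤ b) :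
    pvCnt a (b + 1) s = pvCnt a b s + (if pvHelper b = s then 1 else 0) := by
  unfold pvCnt
  rw [PySem.List.pyRange_one_succ_right h, List.countP_append]
  have h1 : List.countP (fun i => pvHelper i == s) [b] = if pvHelper b = s then 1 else 0 := by
    simp [List.countP_cons]
  rw [h1]
  split_ifs <;> push_cast <;> ring

theorem pvCnt_split (a m b s : Int) (h1 : a ≤ m) (h2 : m ≤ b) :
    pvCnt a b s = pvCnt a m s + pvCnt m b s := by
  unfold pvCnt
  rw [PySem.List.pyRange_one_append a m b h1 h2, List.countP_append]
  push_cast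
  ring

theorem pvCnt_neg (a b s : Int) (hs : s < 0) : pvCnt a b s = 0 := by
  unfold pvCnt
  have h0 : List.countP (fun i => pvHelper i == s) (PySem.List.pyRange a b 1) = 0 := by
    apply List.countP_eq_zero.mpr
    intro i _
    have := pvHelper_nonneg i
    simp only [beq_iff_eq]
    omega
  rw [h0]
  simp

theorem pvCnt_eq_count (a b s : Int) :
    pvCnt a b s = (((PySem.List.pyRange a b 1).map pvHelper).count s : Int) := by
  unfold pvCnt
  rw [List.count_eq_countP, List.countP_map]
  rfl

theorem pvDecade (q s : Int) (hq : 0 ≤ q) : ∀ (k : Nat), k ≤ 10 →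
    pvCnt (10 * q) (10 * q + k) s
      = ((PySem.List.pyRange 0 (k : Int) 1).map (fun d => if pvHelper q + d = s then (1:Int) else 0)).sum := by
  intro k
  induction k with
  | zero =>
    intro _
    simp [pvCnt_nil, PySem.List.pyRange_one_eq_nil]
  | succ k ih =>
    intro hk
    have hk10 : (k : Int) < 10 := by omega
    have hk0 : (0 : Int) ≤ (k : Int) := by omega
    have hcast : ((k + 1 : Nat) : Int) = (k : Int) + 1 := by push_cast; ring
    rw [hcast, show (10 * q + ((k:Int) + 1)) = (10 * q + (k:Int)) + 1 by ring,
      pvCnt_succ _ _ _ (by omega), ih (by omega),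
      PySem.List.pyRange_one_succ_right hk0]
    rw [List.map_append, List.sum_append, List.map_singleton, List.sum_singleton]
    rw [pvHelper_tenmul q (k:Int) hq hk0 hk10]

theorem pvTens (s : Int) : ∀ q : Int, 0 ≤ q →
    pvCnt 0 (10 * q) s = ((PySem.List.pyRange 0 10 1).map (fun d => pvCnt 0 q (s - d))).sum := by
  intro q hq
  induction q, hq using Int.le_induction with
  | base =>
    simp [pvCnt_nil]
  | succ q hq0 ih =>
    have hsplit : pvCnt 0 (10 * (q + 1)) s = pvCnt 0 (10 * q) s + pvCnt (10 * q) (10 * q + 10) s := by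
      rw [show (10 : Int) * (q + 1) = 10 * q + 10 by ring]
      exact pvCnt_split 0 (10 * q) (10 * q + 10) s (by omega) (by omega)
    have hdec := pvDecade q s hq0 10 le_rfl
    norm_num at hdec
    have hstep : ∀ d : Int, pvCnt 0 (q + 1) (s - d)
        = pvCnt 0 q (s - d) + (if pvHelper q = s - d then 1 else 0) :=
      fun d => pvCnt_succ 0 q (s - d) hq0
    rw [hsplit, ih, hdec]
    simp only [hstep]
    rw [show (fun d => pvCnt 0 q (s - d) + (if pvHelper q = s - d then (1:Int) else 0))
        = (fun d => pvCnt 0 q (s - d) + (if pvHelper q + d = s then (1:Int) else 0)) from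
      funext fun d => by split_ifs with h1 h2 h3 <;> omega]
    rw [PySem.List.sum_map_add_int]

theorem pvUpto_correct (n : Int) :
    pvUpto n = (PySem.List.pyRange 0 91 1).map (fun s => pvCnt 0 (n + 1) s) := by
  induction n using pvUpto.induct with
  | case1 n hn =>
    rw [pvUpto, if_pos hn]
    rw [List.map_congr_left (fun s _ => pvCnt_nil 0 (n+1) s (by omega)),
      List.map_const']
    simp [PySem.List.length_pyRange_one]
  | case2 n hn h10 =>
    rw [pvUpto]
    simp only [if_neg hn, if_pos h10]
    apply List.map_congr_left
    intro s hs
    rw [PySem.List.mem_pyRange_one] at hs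
    have hcnt : ∀ m : Int, 0 ≤ m → m ≤ n + 1 →
        pvCnt 0 m s = if s < m then 1 else 0 := by
      intro m hm
      induction m, hm using Int.le_induction with
      | base => intro _; rw [pvCnt_nil 0 0 s le_rfl]; simp; omega
      | succ m hm0 ihm =>
        intro hmn
        rw [pvCnt_succ 0 m s hm0, ihm (by omega), pvHelper_small m hm0 (by omega)]
        split_ifs <;> omega
    rw [hcnt (n + 1) (by omega) le_rfl]
    split_ifs <;> omega
  | case3 n hn h10 q ih =>
    have hqdef : q = PySem.Int.floordiv n 10 := rfl
    rw [pvUpto]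
    simp only [if_neg hn, if_neg h10]
    rw [← hqdef]
    apply List.map_congr_left
    intro s hs
    rw [PySem.List.mem_pyRange_one] at hs
    obtain ⟨hs0, hs91⟩ := hs
    have hq : q = n / 10 := by
      rw [hqdef, PySem.Int.floordiv_eq_ediv_of_pos (show (0:Int) < 10 by norm_num)]
    have hr : PySem.Int.mod n 10 = n % 10 :=
      PySem.Int.mod_eq_emod_of_pos (show (0:Int) < 10 by norm_num)
    have hq0 : 0 ≤ q := by rw [hq]; omega
    have hr0 : 0 ≤ n % 10 := by omega
    have hr9 : n % 10 ≤ 9 := by omega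
    have hn1 : n + 1 = 10 * q + (n % 10 + 1) := by rw [hq]; omega
    rw [hn1, pvCnt_split 0 (10 * q) (10 * q + (n % 10 + 1)) s (by omega) (by omega), hr]
    -- last (partial) decade
    have hdec : pvCnt (10 * q) (10 * q + (n % 10 + 1)) s
        = ((PySem.List.pyRange 0 (n % 10 + 1) 1).map (fun d => if pvHelper q + d = s then (1:Int) else 0)).sum := by
      obtain ⟨k, hk⟩ : ∃ k : Nat, n % 10 + 1 = (k : Int) := ⟨(n % 10 + 1).toNat, by omega⟩
      rw [hk]
      exact pvDecade q s hq0 k (by omega)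
    -- full decades, via pvTens and the induction hypothesis
    have hsub : pvUpto (q - 1) = (PySem.List.pyRange 0 91 1).map (fun t => pvCnt 0 q t) := by
      rw [ih]
      apply List.map_congr_left
      intro t _
      rw [show q - 1 + 1 = q from by ring]
    have hfirst : ((PySem.List.pyRange 0 10 1).map
        (fun d => if 0 ≤ s - d then PySem.List.pyGetD (pvUpto (q - 1)) (s - d) 0 else 0)).sum
        = pvCnt 0 (10 * q) s := by
      rw [pvTens s q hq0]
      apply congrArg List.sum
      apply List.map_congr_left
      intro d hd
      rw [PySem.List.mem_pyRange_one] at hd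
      by_cases hsd : 0 ≤ s - d
      · rw [if_pos hsd, hsub,
          PySem.List.pyGetD_map_pyRange_of_nonneg _ 91 (s - d) 0 hsd (by omega)]
      · rw [if_neg hsd, pvCnt_neg 0 q (s - d) (by omega)]
    rw [hdec, hfirst, pvDigitSum_eq]

-- zip-of-two-comprehensions + filter + map, as Source B builds `groups`
theorem pvZipSel (l : List Int) (f g : Int → Int) :
    (((l.map f).zip (l.map g)).filter (fun p => p.2 < p.1)).map (fun p => p.1 - p.2)
      = (l.filter (fun s => g s < f s)).map (fun s => f s - g s) := by
  induction l with
  | nil => simp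
  | cons a t ih =>
    simp only [List.map_cons, List.zip_cons_cons, List.filter_cons]
    by_cases h : g a < f a
    · simp [h, ih]
    · simp [h, ih]

-- the 0/1-indicator sum in A's final comprehension is a count
theorem pvSumIte (l : List Int) (m : Int) :
    (l.map (fun v => if v = m then (1:Int) else 0)).sum = (l.count m : Int) := by
  induction l with
  | nil => simp
  | cons a t ih =>
    rw [List.map_cons, List.sum_cons, ih, List.count_cons]
    by_cases h : a = m <;> simp [h] <;> push_cast <;> omega

theorem pvMaxEq (l l' : List Int) (hp : l.Perm l') (m m' : Int)
    (h : PySem.List.max? l (fun v => v) = some m)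
    (h' : PySem.List.max? l' (fun v => v) = some m') : m = m' := by
  have hm := PySem.List.max?_mem h
  have hm' := PySem.List.max?_mem h'
  have hx := PySem.List.max?_isMax h' m (hp.mem_iff.mp hm)
  have hx' := PySem.List.max?_isMax h m' (hp.mem_iff.mpr hm')
  exact le_antisymm hx hx'

-- ===== VERDICT (by name: the statement is the Claim_ definition above) =====
theorem findGroup_recur_spec : Claim_equal_findGroup_recur := by
  intro low high hdom hpre
  obtain ⟨hl0, hlh⟩ := hpre
  have hhigh : high ≤ 2147483648 := by
    simp only [Dom_findGroup_recur, pvDomInt, Bool.and_eq_true, decide_eq_true_eq] at hdom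
    exact hdom.2.2
  unfold Spec_findGroup_recur
  -- the multiset of digit sums A walks over
  set ys : List Int := (PySem.List.pyRange low (high + 1) 1).map pvHelper with hys
  set K : List Int := PySem.Set.ofList ys with hK
  set K' : List Int := (PySem.List.pyRange 0 91 1).filter
      (fun s => decide (0 < pvCnt low (high + 1) s)) with hK'
  -- ===== A's side: the counter dict and its values list =====
  have hmpp : (PySem.List.pyRange low (high + 1) 1).foldl
      (fun d i => d.insert (pvHelper i) (d.getD (pvHelper i) 0 + 1)) PySem.Dict.empty
      = PySem.Dict.counter ys := by
    rw [hys, ← PySem.Dict.foldl_insert_getD_add_one_eq_counter, List.foldl_map]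
  have hvals : (PySem.Dict.counter ys).values = K.map (fun s => pvCnt low (high + 1) s) := by
    show ((PySem.Dict.counter ys).items).map (·.2) = K.map (fun s => pvCnt low (high + 1) s)
    rw [PySem.Dict.items_counter, List.map_map]
    apply List.map_congr_left
    intro k _
    simp [pvCnt_eq_count low (high + 1) k, hys]
  have hA : findGroup_recur low high
      = match PySem.List.max? (K.map (fun s => pvCnt low (high + 1) s)) (fun v => v) with
        | some m => [m, ((K.map (fun s => pvCnt low (high + 1) s)).map
            (fun v => if v = m then (1:Int) else 0)).sum]
        | none => [] := by
    unfold findGroup_recur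
    dsimp only
    rw [hmpp, hvals]
  -- ===== B's side =====
  have hsplit : ∀ s : Int, pvCnt 0 (high + 1) s = pvCnt 0 low s + pvCnt low (high + 1) s :=
    fun s => pvCnt_split 0 low (high + 1) s hl0 (by omega)
  have hB : findGroup_recur_alt low high
      = match PySem.List.max? (K'.map (fun s => pvCnt low (high + 1) s)) (fun v => v) with
        | some m => [m, ((K'.map (fun s => pvCnt low (high + 1) s)).count m : Int)]
        | none => [] := by
    unfold findGroup_recur_alt
    dsimp only
    rw [pvUpto_correct high, pvUpto_correct (low - 1), show low - 1 + 1 = low from by ring,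
      pvZipSel]
    have hfilter : (PySem.List.pyRange 0 91 1).filter
        (fun s => decide (pvCnt 0 low s < pvCnt 0 (high + 1) s)) = K' := by
      rw [hK']
      apply List.filter_congr
      intro s _
      rw [decide_eq_decide, hsplit s]
      constructor <;> intro <;> omega
    have hmapv : K'.map (fun s => pvCnt 0 (high + 1) s - pvCnt 0 low s)
        = K'.map (fun s => pvCnt low (high + 1) s) := by
      apply List.map_congr_left
      intro s _
      rw [hsplit s]
      ring
    rw [hfilter, hmapv]
    simp only [PySem.List.count_eq]
  -- ===== the two value lists are permutations of each other =====
  have hmem_ys : ∀ k : Int, k ∈ ys ↔ 0 < pvCnt low (high + 1) k := by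
    intro k
    rw [pvCnt_eq_count low (high + 1) k, ← hys,
      ← List.count_pos_iff (a := k) (l := ys)]
    omega
  have hbound : ∀ k ∈ ys, 0 ≤ k ∧ k < 91 := by
    intro k hk
    rw [hys, List.mem_map] at hk
    obtain ⟨i, hi, rfl⟩ := hk
    rw [PySem.List.mem_pyRange_one] at hi
    have h1 := pvHelper_nonneg i
    have h2 := pvHelper_le90 i (by omega) (by omega)
    exact ⟨h1, by omega⟩
  have hperm : K.Perm K' := by
    rw [List.perm_ext_iff_of_nodup (PySem.Set.nodup_ofList ys)
      ((PySem.List.nodup_pyRange_one 0 91).filter _)]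
    intro k
    rw [PySem.Set.mem_ofList, List.mem_filter, PySem.List.mem_pyRange_one,
      decide_eq_true_eq]
    constructor
    · intro hk
      exact ⟨hbound k hk, (hmem_ys k).mp hk⟩
    · intro hk
      exact (hmem_ys k).mpr hk.2
  have hpermV : (K.map (fun s => pvCnt low (high + 1) s)).Perm
      (K'.map (fun s => pvCnt low (high + 1) s)) := hperm.map _
  -- ===== nonemptiness =====
  have hne : K.map (fun s => pvCnt low (high + 1) s) ≠ [] := by
    have hmem : pvHelper low ∈ ys := by
      rw [hys, List.mem_map]
      exact ⟨low, by rw [PySem.List.mem_pyRange_one]; omega, rfl⟩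
    have hKmem : pvHelper low ∈ K := by rw [hK, PySem.Set.mem_ofList]; exact hmem
    intro hnil
    rw [List.map_eq_nil_iff] at hnil
    simp [hnil] at hKmem
  -- ===== conclude =====
  rw [hA, hB]
  cases hmax : PySem.List.max? (K.map (fun s => pvCnt low (high + 1) s)) (fun v => v) with
  | none => exact absurd ((PySem.List.max?_eq_none_iff _ _).mp hmax) hne
  | some m =>
    cases hmax' : PySem.List.max? (K'.map (fun s => pvCnt low (high + 1) s)) (fun v => v) with
    | none =>
      have h0 := (PySem.List.max?_eq_none_iff _ _).mp hmax'
      rw [h0] at hpermV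
      exact absurd hpermV.eq_nil hne
    | some m' =>
      have hmm : m = m' := pvMaxEq _ _ hpermV m m' hmax hmax'
      dsimp only
      rw [hmm, pvSumIte, hpermV.count_eq]
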